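-- pv_equiv track=rewrite | github.com/M3str3/MacFinder | MacFinder.py | format_mac
-- ===== SOURCE A (Python) =====
-- def format_mac(txt_mac):
--     clean = str(''.join(ch for ch in txt_mac if ch.isalnum())).strip()
--     ind = 0
--     mac = ''
--     for i in clean:
--         if ind == 2:
--             mac+=':'
--             ind = 1
--         else:
--             ind +=1
--         mac += str(i)
--     return mac
-- ===== SOURCE B (Python) =====
-- def format_mac(txt_mac):
--     clean = ''.join(ch for ch in txt_mac if ch.isalnum())
--     return ':'.join(clean[i:i+2] for i in range(0, len(clean), 2))
-- ===== Notes on version B (the rewrite author's own statement) =====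
-- stated objective: idiomatic
-- what changed: Replaces the per-character colon-injection counter loop (and the no-op strip) with slicing the cleaned string into width-2 chunks and joining them with colon separators.
import Mathlib
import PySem

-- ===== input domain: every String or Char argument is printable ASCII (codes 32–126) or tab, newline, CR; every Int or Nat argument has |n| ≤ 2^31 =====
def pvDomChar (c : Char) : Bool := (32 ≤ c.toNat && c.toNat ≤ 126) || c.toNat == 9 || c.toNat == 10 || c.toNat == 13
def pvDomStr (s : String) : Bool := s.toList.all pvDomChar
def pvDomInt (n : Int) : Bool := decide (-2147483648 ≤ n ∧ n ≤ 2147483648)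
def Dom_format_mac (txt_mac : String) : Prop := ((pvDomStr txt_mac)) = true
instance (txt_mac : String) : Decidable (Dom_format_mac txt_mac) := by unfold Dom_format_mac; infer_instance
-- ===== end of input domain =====

-- B drops A's no-op strip and replaces the colon-injection counter loop with
-- slicing the cleaned string into width-2 chunks joined by ':' (idiomatic rewrite, same cost).

-- ===== PORT A =====
-- the 'for i in clean' loop: state (ind, mac)
def formatMacLoop : List Char → Int → List Char → List Char
  | [], _, mac => mac
  | c :: rest, ind, mac =>
    if ind == 2 then formatMacLoop rest 1 ((mac ++ [':']) ++ [c])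
    else formatMacLoop rest (ind + 1) (mac ++ [c])

-- clean = ''.join(ch for ch in txt_mac if ch.isalnum()).strip()
def formatMacClean (txt_mac : String) : List Char :=
  PySem.Chars.strip (txt_mac.toList.filter PySem.Chars.isalnum)

def format_mac (txt_mac : String) : String :=
  String.ofList (formatMacLoop (formatMacClean txt_mac) 0 [])

-- ===== PORT B =====
-- clean = ''.join(ch for ch in txt_mac if ch.isalnum())
def formatMacAltClean (txt_mac : String) : List Char :=
  txt_mac.toList.filter PySem.Chars.isalnum

-- ':'.join(clean[i:i+2] for i in range(0, len(clean), 2))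
def format_mac_alt (txt_mac : String) : String :=
  String.ofList (PySem.Chars.join [':']
    ((PySem.List.pyRange 0 ((formatMacAltClean txt_mac).length : Int) 2).map
      (fun i => PySem.List.slice (formatMacAltClean txt_mac) (some i) (some (i + 2)))))

-- ===== PRECONDITION & SPEC =====
def Spec_format_mac (txt_mac : String) (out : String) : Prop := out = format_mac_alt txt_mac
instance (txt_mac : String) (out : String) : Decidable (Spec_format_mac txt_mac out) := by unfold Spec_format_mac; infer_instance

-- ===== CLAIM (what is proved, stated in full; the proofs are below) =====
def Claim_equal_format_mac : Prop := ∀ (txt_mac : String), Dom_format_mac txt_mac → Spec_format_mac txt_mac (format_mac txt_mac)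

-- ===== LEMMAS AND PROOFS =====

-- the width-2 chunking both programs produce
def chunks2 : List Char → List (List Char)
  | [] => []
  | [a] => [[a]]
  | a :: b :: t => [a, b] :: chunks2 t

theorem isspace_of_isalnum (c : Char) (h : PySem.Chars.isalnum c = true) :
    PySem.Chars.isspace c = false := by
  simp only [PySem.Chars.isalnum, PySem.Chars.isalpha, PySem.Chars.isdigit,
    PySem.Chars.isupper, PySem.Chars.islower, PySem.Chars.isspace, Char.le_def,
    UInt32.le_iff_toNat_le, Char.toNat,
    Bool.or_eq_true, Bool.and_eq_true, decide_eq_true_eq] at *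
  simp only [show '0'.val.toNat = 48 from rfl, show '9'.val.toNat = 57 from rfl,
    show 'A'.val.toNat = 65 from rfl, show 'Z'.val.toNat = 90 from rfl,
    show 'a'.val.toNat = 97 from rfl, show 'z'.val.toNat = 122 from rfl] at h
  simp only [Bool.or_eq_false_iff, Bool.and_eq_false_iff, decide_eq_false_iff_not]
  omega

theorem strip_of_no_space (l : List Char) (h : ∀ c ∈ l, PySem.Chars.isspace c = false) :
    PySem.Chars.strip l = l := by
  have hl : PySem.Chars.lstrip l = l := by
    unfold PySem.Chars.lstrip
    cases l with
    | nil => rfl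
    | cons c t => simp [List.dropWhile, h c (by simp)]
  have hr : PySem.Chars.rstrip l = l := by
    unfold PySem.Chars.rstrip
    cases hrev : l.reverse with
    | nil => simpa using congrArg List.reverse hrev
    | cons c t =>
        have hc : c ∈ l := by
          have : c ∈ l.reverse := by rw [hrev]; simp
          simpa using this
        rw [List.dropWhile, h c hc]
        simpa using congrArg List.reverse hrev.symm
  rw [PySem.Chars.strip, hl, hr]

theorem pyRange_two_nil (a b : Int) (h : b ≤ a) : PySem.List.pyRange a b 2 = [] := by
  rw [PySem.List.pyRange_of_pos a b (by norm_num), if_neg (by omega)]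
  simp

theorem pyRange_two_cons (n : Int) (h : 0 < n) :
    PySem.List.pyRange 0 n 2 = 0 :: PySem.List.pyRange 2 n 2 := by
  rw [PySem.List.pyRange_of_pos 0 n (by norm_num), PySem.List.pyRange_of_pos 2 n (by norm_num),
    if_pos h]
  by_cases h2 : 2 < n
  · rw [if_pos h2]
    have hc : ((n - 0 + 2 - 1) / 2).toNat = ((n - 2 + 2 - 1) / 2).toNat + 1 := by omega
    rw [hc, List.range_succ_eq_map]
    simp only [List.map_cons, List.map_map]
    refine congrArg₂ List.cons (by norm_num) ?_
    apply List.map_congr_left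
    intro k _
    simp only [Function.comp_apply, Nat.succ_eq_add_one]
    push_cast
    ring
  · rw [if_neg h2]
    have hc : ((n - 0 + 2 - 1) / 2).toNat = 1 := by omega
    rw [hc]
    norm_num [List.range_succ]

theorem pyRange_two_shift (n : Int) :
    PySem.List.pyRange 2 n 2 = (PySem.List.pyRange 0 (n - 2) 2).map (· + 2) := by
  rw [PySem.List.pyRange_of_pos 2 n (by norm_num),
    PySem.List.pyRange_of_pos 0 (n - 2) (by norm_num), List.map_map]
  have hif : (if 2 < n then ((n - 2 + 2 - 1) / 2).toNat else 0)
      = (if 0 < n - 2 then ((n - 2 - 0 + 2 - 1) / 2).toNat else 0) := by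
    by_cases h2 : 2 < n
    · rw [if_pos h2, if_pos (by omega)]; ring_nf
    · rw [if_neg h2, if_neg (by omega)]
  rw [hif]
  apply List.map_congr_left
  intro k _
  simp only [Function.comp_apply]
  ring

-- A's loop from state ind = 2 prepends ':' before every chunk of chunks2
theorem formatMacLoop_two (t : List Char) : ∀ mac : List Char,
    formatMacLoop t 2 mac = mac ++ (chunks2 t).flatMap (fun ch => ':' :: ch) := by
  induction t using chunks2.induct with
  | case1 => intro mac; simp [formatMacLoop, chunks2]
  | case2 a => intro mac; simp [formatMacLoop, chunks2]
  | case3 a b t ih =>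
      intro mac
      simp only [formatMacLoop, chunks2]
      norm_num
      rw [ih]
      simp

theorem join_colon_cons (rest : List (List Char)) : ∀ x : List Char,
    PySem.Chars.join [':'] (x :: rest) = x ++ rest.flatMap (fun ch => ':' :: ch) := by
  induction rest with
  | nil => intro x; simp [PySem.Chars.join, List.intercalate]
  | cons y t ih =>
      intro x
      rw [PySem.Chars.join_cons_cons, ih y]
      simp

theorem loop_eq_join (l : List Char) :
    formatMacLoop l 0 [] = PySem.Chars.join [':'] (chunks2 l) := by
  cases l with
  | nil => rfl
  | cons a t =>
      cases t with
      | nil => rfl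
      | cons b t' =>
          show formatMacLoop (a :: b :: t') 0 [] = _
          simp only [formatMacLoop]
          norm_num
          rw [formatMacLoop_two, show chunks2 (a :: b :: t') = [a, b] :: chunks2 t' from rfl,
            join_colon_cons]

theorem slices_eq_chunks2 (l : List Char) :
    (PySem.List.pyRange 0 (l.length : Int) 2).map
      (fun i => PySem.List.slice l (some i) (some (i + 2))) = chunks2 l := by
  induction l using chunks2.induct with
  | case1 => simp [pyRange_two_nil 0 0 le_rfl, chunks2]
  | case2 a =>
      rw [show ((([a] : List Char).length : Int)) = 1 by simp,
        pyRange_two_cons 1 one_pos, pyRange_two_nil 2 1 (by norm_num)]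
      simp only [List.map_cons, List.map_nil, chunks2]
      rw [PySem.List.slice_toNat ([a]) (le_refl 0) (by norm_num : (0:Int) ≤ 0 + 2)]
      simp
  | case3 a b t ih =>
      have hn : ((a :: b :: t).length : Int) = (t.length : Int) + 2 := by simp; ring
      rw [hn, pyRange_two_cons _ (by positivity), pyRange_two_shift, List.map_cons, List.map_map]
      have h2 : ((t.length : Int) + 2 - 2) = (t.length : Int) := by ring
      rw [h2, show chunks2 (a :: b :: t) = [a, b] :: chunks2 t from rfl]
      refine congrArg₂ List.cons ?_ ?_
      · rw [PySem.List.slice_toNat _ (le_refl 0) (by norm_num : (0:Int) ≤ 0 + 2)]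
        simp
      · rw [← ih]
        apply List.map_congr_left
        intro i hi
        have hi0 : 0 ≤ i := ((PySem.List.mem_pyRange_iff_of_pos (by norm_num) i).mp hi).1
        simp only [Function.comp_apply]
        rw [PySem.List.slice_toNat _ (by omega : (0:Int) ≤ i + 2) (by omega : (0:Int) ≤ i + 2 + 2),
          PySem.List.slice_toNat _ hi0 (by omega : (0:Int) ≤ i + 2)]
        have e1 : (i + 2).toNat = i.toNat + 2 := by omega
        have e2 : (i + 2 + 2).toNat = i.toNat + 4 := by omega
        rw [e1, e2]
        simp only [List.drop]
        congr 1
        omega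

-- ===== VERDICT (by name: the statement is the Claim_ definition above) =====
theorem format_mac_spec : Claim_equal_format_mac := by
  intro txt _
  unfold Spec_format_mac format_mac format_mac_alt formatMacClean formatMacAltClean
  have hstrip : PySem.Chars.strip (txt.toList.filter PySem.Chars.isalnum)
      = txt.toList.filter PySem.Chars.isalnum := by
    apply strip_of_no_space
    intro c hc
    exact isspace_of_isalnum c (List.of_mem_filter hc)
  rw [hstrip, loop_eq_join, ← slices_eq_chunks2]
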